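-- pv_equiv track=rewrite | github.com/ZygimantasB/code_wars_practice | pynative/string_practice.py | lowercase_first
-- ===== SOURCE A (Python) =====
-- def lowercase_first(word):
--     lower_case = ''
--     upper_case = ''
--     for char in word:
--         if char.islower():
--             lower_case += char
--         else:
--             upper_case += char
--     return lower_case + upper_case
-- ===== SOURCE B (Python) =====
-- def lowercase_first(word):
--     return ''.join(sorted(word, key=lambda c: not c.islower()))
-- ===== Notes on version B (the rewrite author's own statement) =====
-- stated objective: idiomatic
-- what changed: Replaced the two-accumulator partition loop with a one-liner stable sort keyed on whether the character is not lowercase; stability puts lowercase characters first in original order.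
import Mathlib
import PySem

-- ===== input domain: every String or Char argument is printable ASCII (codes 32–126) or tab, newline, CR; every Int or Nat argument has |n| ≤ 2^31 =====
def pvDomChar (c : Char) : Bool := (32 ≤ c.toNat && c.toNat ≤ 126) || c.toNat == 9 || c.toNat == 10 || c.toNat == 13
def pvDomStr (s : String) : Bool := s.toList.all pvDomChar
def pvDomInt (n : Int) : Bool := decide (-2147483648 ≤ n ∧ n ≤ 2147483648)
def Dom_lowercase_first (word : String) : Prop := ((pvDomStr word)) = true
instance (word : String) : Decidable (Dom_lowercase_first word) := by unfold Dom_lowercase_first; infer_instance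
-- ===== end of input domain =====

-- B replaces A's two-accumulator partition loop with a stable sort on the key 'not islower' (idiomatic one-liner).

-- ===== PORT A =====
-- A: one loop, two string accumulators (ported as char-list accumulators), concatenated at the end.
def lowercase_first (word : String) : String :=
  let p := word.toList.foldl
    (fun (acc : List Char × List Char) c =>
      if PySem.Chars.islower c then (acc.1 ++ [c], acc.2) else (acc.1, acc.2 ++ [c]))
    ([], [])
  String.mk (p.1 ++ p.2)

-- ===== PORT B =====
-- B: ''.join(sorted(word, key=lambda c: not c.islower()))
def lowercase_first_alt (word : String) : String :=
  String.mk (PySem.List.sorted word.toList (fun c => !(PySem.Chars.islower c)) false)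

-- ===== PRECONDITION & SPEC =====
def Spec_lowercase_first (word : String) (out : String) : Prop := out = lowercase_first_alt word
instance (word : String) (out : String) : Decidable (Spec_lowercase_first word out) := by unfold Spec_lowercase_first; infer_instance

-- ===== CLAIM (what is proved, stated in full; the proofs are below) =====
def Claim_equal_lowercase_first : Prop := ∀ (word : String), Dom_lowercase_first word → Spec_lowercase_first word (lowercase_first word)

-- ===== LEMMAS AND PROOFS =====

-- Inserting x into a list that is (all-lowercase L) ++ (all-non-lowercase U) with the
-- boolean key 'not islower' puts x at the end of its group.
theorem insertBy_partition (x : Char) (L U : List Char)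
    (hL : ∀ a ∈ L, PySem.Chars.islower a = true)
    (hU : ∀ a ∈ U, PySem.Chars.islower a = false) :
    PySem.List.insertBy
      (fun a b => decide ((!(PySem.Chars.islower a)) < (!(PySem.Chars.islower b)))) x (L ++ U)
      = if PySem.Chars.islower x then L ++ x :: U else L ++ (U ++ [x]) := by
  induction L with
  | nil =>
    induction U with
    | nil => simp [PySem.List.insertBy]
    | cons u us ihU =>
      have hu : PySem.Chars.islower u = false := hU u (by simp)
      simp only [List.nil_append] at ihU ⊢
      by_cases hx : PySem.Chars.islower x = true
      · simp [PySem.List.insertBy, hu, hx, Bool.lt_iff]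
      · simp only [Bool.not_eq_true] at hx
        have := ihU (fun a ha => hU a (by simp [ha]))
        simp [PySem.List.insertBy, hu, hx, Bool.lt_iff] at this ⊢
        exact this
  | cons a L' ihL =>
    have ha : PySem.Chars.islower a = true := hL a (by simp)
    have := ihL (fun b hb => hL b (by simp [hb]))
    simp only [List.cons_append]
    by_cases hx : PySem.Chars.islower x = true <;>
      simp [PySem.List.insertBy, ha, hx, Bool.lt_iff] at this ⊢ <;> exact this

-- The insertion-sort fold with key 'not islower' computes the stable partition.
theorem foldl_insertBy_partition (xs : List Char) (L U : List Char)
    (hL : ∀ a ∈ L, PySem.Chars.islower a = true)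
    (hU : ∀ a ∈ U, PySem.Chars.islower a = false) :
    xs.foldl
      (fun acc x => PySem.List.insertBy
        (fun a b => decide ((!(PySem.Chars.islower a)) < (!(PySem.Chars.islower b)))) x acc)
      (L ++ U)
      = (L ++ xs.filter (fun c => PySem.Chars.islower c))
        ++ (U ++ xs.filter (fun c => !(PySem.Chars.islower c))) := by
  induction xs generalizing L U with
  | nil => simp
  | cons c cs ih =>
    simp only [List.foldl_cons, insertBy_partition c L U hL hU]
    by_cases hc : PySem.Chars.islower c = true
    · have hL' : ∀ a ∈ L ++ [c], PySem.Chars.islower a = true := by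
        intro a ha
        rcases List.mem_append.mp ha with h | h
        · exact hL a h
        · simp at h; simpa [h] using hc
      have hsplit : L ++ c :: U = (L ++ [c]) ++ U := by simp
      rw [if_pos hc, hsplit, ih (L ++ [c]) U hL' hU]
      simp [List.filter_cons, hc]
    · have hc' : PySem.Chars.islower c = false := by simpa using hc
      have hU' : ∀ a ∈ U ++ [c], PySem.Chars.islower a = false := by
        intro a ha
        rcases List.mem_append.mp ha with h | h
        · exact hU a h
        · simp at h; simpa [h] using hc'
      rw [if_neg hc, List.append_assoc, ih L (U ++ [c]) hL hU']
      simp [List.filter_cons, hc']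

-- A's fold with two accumulators computes the same stable partition.
theorem foldl_pair_partition (xs : List Char) (l u : List Char) :
    xs.foldl
      (fun (acc : List Char × List Char) c =>
        if PySem.Chars.islower c then (acc.1 ++ [c], acc.2) else (acc.1, acc.2 ++ [c]))
      (l, u)
      = (l ++ xs.filter (fun c => PySem.Chars.islower c),
         u ++ xs.filter (fun c => !(PySem.Chars.islower c))) := by
  induction xs generalizing l u with
  | nil => simp
  | cons c cs ih =>
    by_cases hc : PySem.Chars.islower c = true <;>
      simp [List.foldl_cons, List.filter_cons, hc, ih]

-- ===== VERDICT (by name: the statement is the Claim_ definition above) =====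
theorem lowercase_first_spec : Claim_equal_lowercase_first := by
  intro word _
  show lowercase_first word = lowercase_first_alt word
  unfold lowercase_first lowercase_first_alt
  rw [PySem.List.sorted_eq_foldl_insertBy]
  have h := foldl_insertBy_partition word.toList [] [] (by simp) (by simp)
  simp only [List.nil_append] at h
  rw [h, foldl_pair_partition word.toList [] []]
  simp
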